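-- pv_equiv track=rewrite | github.com/insutance/python-and-sql | pythons/greedy/02_큰수의법칙.py | solution
-- ===== SOURCE A (Python) =====
-- def solution(data, m, k):
--     result = 0
--
--     data.sort()
--
--     for i in range(1,m+1):
--         if i%k != 0:
--             result += data[-1]
--         else:
--             result += data[-2]
--
--     return result
-- ===== SOURCE B (Python) =====
-- def solution(data, m, k):
--     # Closed form: of the m picks, m // abs(k) fall on multiples of k (second-largest),
--     # the rest take the largest; one pass finds the top two, no sort, no O(m) loop.
--     # Unlike A, this does not sort `data` in place (return value is identical).
--     if m <= 0:
--         return 0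
--     t1 = t2 = None
--     for x in data:
--         if t1 is None or x > t1:
--             t1, t2 = x, t1
--         elif t2 is None or x > t2:
--             t2 = x
--     q = m // abs(k)
--     if q == 0:
--         return m * t1
--     return (m - q) * t1 + q * t2
-- ===== Notes on version B (the rewrite author's own statement) =====
-- stated objective: faster
-- what changed: Replaces A's in-place sort plus an O(m) loop over range(1,m+1) with a single O(n) pass that tracks the two largest elements and the closed form m//abs(k) for how many of the m picks land on the second-largest.
import Mathlib
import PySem

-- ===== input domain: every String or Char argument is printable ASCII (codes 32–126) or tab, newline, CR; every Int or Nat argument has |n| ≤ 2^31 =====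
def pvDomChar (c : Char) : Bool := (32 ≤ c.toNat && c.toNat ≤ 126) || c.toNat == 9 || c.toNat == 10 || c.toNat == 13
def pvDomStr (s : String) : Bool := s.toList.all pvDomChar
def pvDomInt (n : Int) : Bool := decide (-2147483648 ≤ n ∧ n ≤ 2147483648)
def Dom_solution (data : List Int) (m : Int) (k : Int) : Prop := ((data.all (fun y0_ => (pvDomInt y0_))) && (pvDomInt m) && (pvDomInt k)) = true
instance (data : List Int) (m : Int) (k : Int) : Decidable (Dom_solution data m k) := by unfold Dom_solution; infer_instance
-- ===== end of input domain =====

-- B replaces A's sort + O(m) loop by a one-pass top-two scan and the closed form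
-- m//abs(k) for the number of picks that hit the second-largest (measured faster).
-- A sorts `data` in place; B does not mutate it — the equivalence is about the return value.

-- ===== PORT A =====
-- data[-1]/data[-2] ported with pyGetD default 0; the IndexError inputs are outside Pre_.
def solution (data : List Int) (m : Int) (k : Int) : Int :=
  let d := PySem.List.sorted data (fun x => x) false
  (PySem.List.pyRange 1 (m + 1) 1).foldl
    (fun result i =>
      if PySem.Int.mod i k ≠ 0 then result + PySem.List.pyGetD d (-1) 0
      else result + PySem.List.pyGetD d (-2) 0) 0

-- ===== PORT B =====
-- one step of B's loop: fold x into the running (largest, second-largest) pair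
def top2step (st : Option Int × Option Int) (x : Int) : Option Int × Option Int :=
  match st with
  | (none, _) => (some x, none)            -- t1 is None: t1, t2 = x, t1 (= None)
  | (some a, t2) =>
      if a < x then (some x, some a)       -- x > t1: t1, t2 = x, t1
      else
        match t2 with
        | none => (some a, some x)         -- t2 is None: t2 = x
        | some b => if b < x then (some a, some x) else (some a, some b)

-- `m * t1` with t1 = None raises in Python; those inputs are outside Pre_, `.getD 0` here.
def solution_alt (data : List Int) (m : Int) (k : Int) : Int :=
  if m ≤ 0 then 0
  else
    let p := data.foldl top2step (none, none)
    let q := PySem.Int.floordiv m |k|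
    if q = 0 then m * p.1.getD 0
    else (m - q) * p.1.getD 0 + q * p.2.getD 0

-- ===== PRECONDITION & SPEC =====
-- Pre_ is exactly where the Python A returns: for m ≥ 1 it needs k ≠ 0 (else
-- ZeroDivisionError at i=1), a nonempty list for data[-1], and, when some i ∈ [1,m]
-- is a multiple of k (i.e. |k| ≤ m), at least two elements for data[-2] (IndexError).
def Pre_solution (data : List Int) (m : Int) (k : Int) : Prop :=
  1 ≤ m → (k ≠ 0 ∧ data ≠ [] ∧ ((k.natAbs : Int) ≤ m → 2 ≤ data.length))
instance (data : List Int) (m : Int) (k : Int) : Decidable (Pre_solution data m k) := by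
  unfold Pre_solution; infer_instance

def pvWitness_solution : List Int × Int × Int := ([3, 5, 2], 8, 3)

def Spec_solution (data : List Int) (m : Int) (k : Int) (out : Int) : Prop := out = solution_alt data m k
instance (data : List Int) (m : Int) (k : Int) (out : Int) : Decidable (Spec_solution data m k out) := by unfold Spec_solution; infer_instance

-- ===== CLAIM (what is proved, stated in full; the proofs are below) =====
def Claim_equal_solution : Prop := ∀ (data : List Int) (m : Int) (k : Int), Dom_solution data m k → Pre_solution data m k → Spec_solution data m k (solution data m k)

-- ===== LEMMAS AND PROOFS =====

-- B's step is right-commutative: the top-two pair does not depend on the scan order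
set_option maxHeartbeats 1000000 in
theorem top2step_rcomm (z : Option Int × Option Int) (x y : Int) :
    top2step (top2step z x) y = top2step (top2step z y) x := by
  obtain ⟨t1, t2⟩ := z
  cases t1 <;> cases t2 <;> simp only [top2step] <;> (repeat' split) <;>
    (try split_ifs at * ) <;> simp_all <;> omega

-- xs[-2] of a snoc is xs[-1] of the prefix
theorem pyGet?_neg_two_append (d : List Int) (x : Int) :
    PySem.List.pyGet? (d ++ [x]) (-2) = PySem.List.pyGet? d (-1) := by
  cases d with
  | nil => simp [PySem.List.pyGet?, PySem.List.pyIdx?]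
  | cons a t =>
      rw [PySem.List.pyGet?_neg_ofNat (a :: t ++ [x]) 2 (by omega) (by simp),
          PySem.List.pyGet?_neg_one]
      simp [List.getLast?_eq_getElem?]
      have h : (a :: (t ++ [x]))[t.length]? = (a :: t)[t.length]? := by
        rw [show a :: (t ++ [x]) = (a :: t) ++ [x] from rfl]
        exact List.getElem?_append_left (by simp)
      rwa [List.getElem?_eq_getElem (by simp), List.getElem?_eq_getElem (by simp),
           Option.some_inj] at h

-- on an ascending list B's fold computes exactly (xs[-1], xs[-2])
theorem top2_fold_sorted (d : List Int) (hp : d.Pairwise (· ≤ ·)) :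
    d.foldl top2step (none, none) = (PySem.List.pyGet? d (-1), PySem.List.pyGet? d (-2)) := by
  induction d using List.reverseRecOn with
  | nil => simp [PySem.List.pyGet?, PySem.List.pyIdx?]
  | append_singleton d x ih =>
      have hp' := (List.pairwise_append.1 hp)
      have hle : ∀ y ∈ d, y ≤ x := fun y hy => hp'.2.2 y hy x (by simp)
      rw [List.foldl_append, ih hp'.1, PySem.List.pyGet?_neg_one_append_singleton,
          pyGet?_neg_two_append]
      rcases eq_or_ne d [] with hd | hne
      · subst hd; simp [PySem.List.pyGet?, PySem.List.pyIdx?, top2step]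
      · have hlast : PySem.List.pyGet? d (-1) = some (d.getLast hne) := by
          rw [PySem.List.pyGet?_neg_one, List.getLast?_eq_getLast_of_ne_nil hne]
        have hlx : d.getLast hne ≤ x := hle _ (List.getLast_mem hne)
        rw [hlast]
        simp only [List.foldl_cons, List.foldl_nil, top2step]
        by_cases h1 : d.getLast hne < x
        · simp [h1]
        · have hx : d.getLast hne = x := le_antisymm hlx (not_lt.1 h1)
          simp only [if_neg h1]
          cases h2 : PySem.List.pyGet? d (-2) with
          | none => simp [hx]
          | some b =>
              have hbl : b ≤ d.getLast hne := by
                have hlen : 2 ≤ d.length := by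
                  by_contra hc
                  have h1l : d.length = 1 := by
                    have := List.length_pos_iff.2 hne; omega
                  have hnone : PySem.List.pyGet? d (-2) = none := by
                    rw [PySem.List.pyGet?_eq_none_iff]
                    simp [PySem.Raise.InRange, h1l]
                  simp [hnone] at h2
                rw [PySem.List.pyGet?_neg_ofNat d 2 (by omega) hlen,
                    List.getElem?_eq_getElem (by omega), Option.some_inj] at h2
                rw [List.getLast_eq_getElem]
                have hmono := (List.pairwise_iff_getElem.1 hp'.1) (d.length - 2) (d.length - 1)
                    (by omega) (by omega) (by omega)
                rw [h2] at hmono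
                exact hmono
              by_cases h3 : b < x
              · simp [h3, hx]
              · have hbx : b = x := by omega
                simp [hx, hbx]

-- the fold over data equals the fold over the sorted copy (right-commutative step)
theorem top2_fold_eq (data : List Int) :
    data.foldl top2step (none, none)
      = (PySem.List.sorted data (fun x => x) false).foldl top2step (none, none) := by
  haveI : RightCommutative top2step := ⟨fun z x y => top2step_rcomm z x y⟩
  exact ((PySem.List.sorted_perm data (fun x => x) false).symm.foldl_eq _)

-- closed form of A's loop: q of the m iterations add b, the rest add a, q = m // |k|
theorem loopA_closed (a b k : Int) (n : Nat) :
    (PySem.List.pyRange 1 ((n : Int) + 1) 1).foldl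
      (fun r i => if PySem.Int.mod i k ≠ 0 then r + a else r + b) 0
    = ((n : Int) - ((n / k.natAbs : Nat) : Int)) * a + ((n / k.natAbs : Nat) : Int) * b := by
  induction n with
  | zero => simp [PySem.List.pyRange_one_eq_nil]
  | succ n ih =>
      rw [show ((n + 1 : Nat) : Int) + 1 = ((n : Int) + 1) + 1 by push_cast; ring,
          PySem.List.pyRange_one_succ_right (by omega : (1:Int) ≤ (n:Int)+1),
          List.foldl_append, ih]
      simp only [List.foldl_cons, List.foldl_nil]
      rw [Nat.succ_div]
      have hdvd : PySem.Int.mod ((n : Int) + 1) k = 0 ↔ k.natAbs ∣ (n + 1) := by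
        rw [PySem.Int.mod_eq_zero_iff_dvd]
        constructor
        · intro h
          have h2 := Int.natAbs_dvd_natAbs.2 h
          rwa [show ((n:Int)+1).natAbs = n+1 by omega] at h2
        · intro h
          have h2 : (k.natAbs : Int) ∣ ((n : Int) + 1) := by exact_mod_cast h
          exact (Int.natAbs_dvd.1 h2)
      by_cases hc : k.natAbs ∣ (n + 1)
      · rw [if_neg (by simp [hdvd.2 hc]), if_pos hc]
        push_cast; ring
      · rw [if_pos (fun h => hc (hdvd.1 h)), if_neg hc]
        push_cast; ring

-- ===== VERDICT (by name: the statement is the Claim_ definition above) =====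
theorem solution_spec : Claim_equal_solution := by
  intro data m k _ _
  unfold Spec_solution solution solution_alt
  by_cases hm : m ≤ 0
  · rw [PySem.List.pyRange_one_eq_nil (by omega)]
    simp [hm]
  · set d := PySem.List.sorted data (fun x => x) false with hd
    have hfold : data.foldl top2step (none, none)
        = (PySem.List.pyGet? d (-1), PySem.List.pyGet? d (-2)) := by
      rw [top2_fold_eq]
      exact top2_fold_sorted d (PySem.List.sorted_pairwise data (fun x => x))
    obtain ⟨n, hn⟩ : ∃ n : Nat, m = (n : Int) := ⟨m.toNat, by omega⟩
    have habs : |k| = (k.natAbs : Int) := Int.abs_eq_natAbs k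
    have hq : PySem.Int.floordiv m |k| = ((n / k.natAbs : Nat) : Int) := by
      rw [hn, habs]; exact_mod_cast PySem.Int.floordiv_natCast n k.natAbs
    have hget1 : PySem.List.pyGetD d (-1) 0 = (PySem.List.pyGet? d (-1)).getD 0 := by
      simp [PySem.List.pyGetD, PySem.List.pyGet?]
    have hget2 : PySem.List.pyGetD d (-2) 0 = (PySem.List.pyGet? d (-2)).getD 0 := by
      simp [PySem.List.pyGetD, PySem.List.pyGet?]
    rw [hn] at hm hq ⊢
    rw [loopA_closed]
    simp only [if_neg hm, hfold, hq, hget1, hget2]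
    by_cases hq0 : ((n / k.natAbs : Nat) : Int) = 0
    · rw [if_pos hq0, hq0]; ring
    · rw [if_neg hq0]
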